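-- pv_equiv track=rewrite | github.com/IEE-TUGraz/LEGO-Pyomo | tools/mpsCompare.py | sort_constraints
-- ===== SOURCE A (Python) =====
-- import typing
-- from collections import OrderedDict
--
-- def sort_constraints(constraints: typing.Dict[str, OrderedDict[str, str]]) -> OrderedDict[int, OrderedDict[str, OrderedDict[str, str]]]:
--     constraint_dicts: OrderedDict[int, OrderedDict[str, OrderedDict[str, str]]] = OrderedDict()
--
--     for constraint_name, constraint in constraints.items():
--         if len(constraint) not in constraint_dicts:
--             constraint_dicts[len(constraint)] = OrderedDict()  # Initialize dictionary
--
--         if constraint_name in constraint_dicts[len(constraint)]: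
--             raise ValueError(f"Constraint {constraint_name} already in dictionary")
--
--         constraint_dicts[len(constraint)][constraint_name] = constraint  # Add constraint to dictionary
--     return OrderedDict(sorted(constraint_dicts.items()))
-- ===== SOURCE B (Python) =====
-- import typing
-- from collections import OrderedDict
--
--
-- def sort_constraints(constraints: typing.Dict[str, OrderedDict[str, str]]) -> OrderedDict[int, OrderedDict[str, OrderedDict[str, str]]]:
--     # Sort the items once by constraint length (stable, so insertion order is
--     # kept within each length), then slice out each run of equal lengths.
--     items = sorted(constraints.items(), key=lambda kv: len(kv[1]))
--     result: OrderedDict[int, OrderedDict[str, OrderedDict[str, str]]] = OrderedDict()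
--     i, n = 0, len(items)
--     while i < n:
--         length = len(items[i][1])
--         j = i
--         while j < n and len(items[j][1]) == length:
--             j += 1
--         result[length] = OrderedDict(items[i:j])
--         i = j
--     return result
-- ===== Notes on version B (the rewrite author's own statement) =====
-- stated objective: alternative
-- what changed: Instead of building a dict-of-dicts bucket per length while scanning and sorting the buckets at the end, B stably sorts the items once by constraint length and slices consecutive runs of equal length into the output dict; the per-bucket duplicate-name ValueError is dropped since dict keys are unique.
import Mathlib
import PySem

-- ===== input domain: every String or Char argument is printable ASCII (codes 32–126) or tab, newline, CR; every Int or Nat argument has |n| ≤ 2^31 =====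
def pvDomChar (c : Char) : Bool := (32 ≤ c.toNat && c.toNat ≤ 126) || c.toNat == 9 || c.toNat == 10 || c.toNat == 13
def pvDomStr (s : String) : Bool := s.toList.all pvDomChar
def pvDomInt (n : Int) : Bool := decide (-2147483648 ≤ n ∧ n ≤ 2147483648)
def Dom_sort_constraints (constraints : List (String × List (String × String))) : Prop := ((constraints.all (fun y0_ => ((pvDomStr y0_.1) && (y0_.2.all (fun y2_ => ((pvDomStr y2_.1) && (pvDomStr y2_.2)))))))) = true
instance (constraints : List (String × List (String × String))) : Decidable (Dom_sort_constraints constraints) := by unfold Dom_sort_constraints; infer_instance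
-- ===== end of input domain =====

-- B replaces A's bucket-dict-then-sort grouping by one stable sort by length followed by slicing
-- consecutive runs of equal length (objective: alternative; same results, no speed claim).

-- ===== PORT A =====
-- A: one pass building a dict length → OrderedDict of the constraints of that length, then
-- sorted(cd.items()) — the outer keys are distinct ints, so comparing items pairs = comparing keys;
-- the 'raise ValueError' branch can only fire when two entries share a constraint name, which is
-- impossible for a Python dict argument (excluded by Pre_); there the port keeps the later value.
def sort_constraints (constraints : List (String × List (String × String))) :
    List (Int × List (String × List (String × String))) :=
  let cd : PySem.Dict Int (PySem.Dict String (List (String × String))) :=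
    constraints.foldl (fun cd kv =>
      let L : Int := (kv.2.length : Int)
      let cd := if cd.contains L then cd else cd.insert L PySem.Dict.empty
      cd.insert L ((cd.getD L PySem.Dict.empty).insert kv.1 kv.2)) PySem.Dict.empty
  (PySem.List.sorted cd.items (fun p => p.1)).map (fun p => (p.1, p.2.items))

-- ===== PORT B =====
-- Source B's inner while loop: slice off the leading run of equal lengths, recurse on the rest.
def pvRuns : List (String × List (String × String)) → List (Int × List (String × List (String × String)))
  | [] => []
  | kv :: rest =>
    let L : Int := (kv.2.length : Int)
    (L, kv :: rest.takeWhile (fun x => (x.2.length : Int) == L)) ::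
      pvRuns (rest.dropWhile (fun x => (x.2.length : Int) == L))
  termination_by l => l.length
  decreasing_by simpa using Nat.lt_succ_of_le (List.length_dropWhile_le _ _)

def sort_constraints_alt (constraints : List (String × List (String × String))) :
    List (Int × List (String × List (String × String))) :=
  pvRuns (PySem.List.sorted constraints (fun kv => (kv.2.length : Int)))

-- ===== PRECONDITION & SPEC =====
-- Pre_ requires distinct constraint names: the Python parameter is a dict, so an association list
-- with duplicate keys represents no Python input at all (on a same-length duplicate A would raise
-- ValueError); every input reaching the Python function satisfies Pre_.
def Pre_sort_constraints (constraints : List (String × List (String × String))) : Prop :=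
  (constraints.map Prod.fst).Nodup
instance (constraints : List (String × List (String × String))) : Decidable (Pre_sort_constraints constraints) := by unfold Pre_sort_constraints; infer_instance

def pvWitness_sort_constraints : (List (String × List (String × String))) :=
  [("a", [("x", "y")]), ("b", [])]

def Spec_sort_constraints (constraints : List (String × List (String × String))) (out : List (Int × List (String × List (String × String)))) : Prop := out = sort_constraints_alt constraints
instance (constraints : List (String × List (String × String))) (out : List (Int × List (String × List (String × String)))) : Decidable (Spec_sort_constraints constraints out) := by unfold Spec_sort_constraints; infer_instance

-- ===== CLAIM (what is proved, stated in full; the proofs are below) =====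
def Claim_equal_sort_constraints : Prop := ∀ (constraints : List (String × List (String × String))), Dom_sort_constraints constraints → Pre_sort_constraints constraints → Spec_sort_constraints constraints (sort_constraints constraints)

-- ===== LEMMAS AND PROOFS =====

-- A's loop body: the conditional bucket initialisation folds into a single insert.
theorem pvA_fun_eq :
    (fun (cd : PySem.Dict Int (PySem.Dict String (List (String × String)))) (kv : String × List (String × String)) =>
      let L : Int := (kv.2.length : Int)
      let cd := if cd.contains L then cd else cd.insert L PySem.Dict.empty
      cd.insert L ((cd.getD L PySem.Dict.empty).insert kv.1 kv.2))
    = (fun cd kv => cd.insert ((kv.2.length : Int))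
        ((cd.getD ((kv.2.length : Int)) PySem.Dict.empty).insert kv.1 kv.2)) := by
  funext cd kv
  by_cases h : cd.contains ((kv.2.length : Int)) = true
  · simp [h]
  · simp only []
    rw [if_neg (by simpa using h)]
    rw [PySem.Dict.getD_insert_self, PySem.Dict.insert_insert_self,
      PySem.Dict.getD_of_not_contains cd _ (by simpa using h)]

-- Invariant of A's loop: under distinct names, each bucket's items are exactly the filter.
theorem pvBucketA :
    ∀ (l : List (String × List (String × String)))
      (d : PySem.Dict Int (PySem.Dict String (List (String × String)))),
      (l.map Prod.fst).Nodup →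
      (∀ kv ∈ l, ∀ L : Int, ((d.getD L PySem.Dict.empty).contains kv.1) = false) →
      ∀ L : Int,
      ((l.foldl (fun cd kv => cd.insert ((kv.2.length : Int))
          ((cd.getD ((kv.2.length : Int)) PySem.Dict.empty).insert kv.1 kv.2)) d).getD L PySem.Dict.empty).items
        = (d.getD L PySem.Dict.empty).items ++ l.filter (fun kv => ((kv.2.length : Int) == L))
  | [], d, _, _, L => by simp
  | kv :: t, d, hn, hf, L => by
    have hfresh : (d.getD ((kv.2.length : Int)) PySem.Dict.empty).contains kv.1 = false :=
      hf kv (by simp) _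
    have hstep : ∀ M : Int,
        ((d.insert ((kv.2.length : Int)) ((d.getD ((kv.2.length : Int)) PySem.Dict.empty).insert kv.1 kv.2)).getD M PySem.Dict.empty)
          = if M = ((kv.2.length : Int)) then (d.getD ((kv.2.length : Int)) PySem.Dict.empty).insert kv.1 kv.2
            else d.getD M PySem.Dict.empty := by
      intro M; rw [PySem.Dict.getD_insert]
    have hcons : kv.1 ∉ t.map Prod.fst ∧ (t.map Prod.fst).Nodup := by
      rw [List.map_cons, List.nodup_cons] at hn; exact hn
    have hn0 : kv.1 ∉ t.map Prod.fst := hcons.1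
    have hn' : (t.map Prod.fst).Nodup := hcons.2
    have hf' : ∀ x ∈ t, ∀ M : Int,
        (((d.insert ((kv.2.length : Int)) ((d.getD ((kv.2.length : Int)) PySem.Dict.empty).insert kv.1 kv.2)).getD M PySem.Dict.empty).contains x.1) = false := by
      intro x hx M
      have hxne : x.1 ≠ kv.1 := by
        intro hEq; exact hn0 (by rw [← hEq]; exact List.mem_map_of_mem hx)
      rw [hstep M]
      split_ifs with hMK
      · rw [PySem.Dict.contains_insert]
        simp [hxne, hf x (List.mem_cons_of_mem _ hx)]
      · exact hf x (List.mem_cons_of_mem _ hx) M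
    have ih := pvBucketA t
      (d.insert ((kv.2.length : Int)) ((d.getD ((kv.2.length : Int)) PySem.Dict.empty).insert kv.1 kv.2))
      hn' hf' L
    rw [List.foldl_cons] at *
    rw [ih, hstep L]
    by_cases hLK : L = ((kv.2.length : Int))
    · subst hLK
      rw [if_pos rfl, PySem.Dict.items_insert_of_not_contains _ _ hfresh]
      simp
    · rw [if_neg hLK]
      have : ((kv.2.length : Int) == L) = false := by
        simp; exact fun h => hLK h.symm
      simp [this]

-- A equals the canonical "sorted distinct lengths, mapped to filters" form.
theorem pvA_eq_canon (c : List (String × List (String × String)))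
    (hpre : Pre_sort_constraints c) :
    sort_constraints c
      = (PySem.List.sorted (PySem.Set.ofList (c.map (fun kv => (kv.2.length : Int)))) (fun x => x)).map
          (fun L => (L, c.filter (fun kv => ((kv.2.length : Int) == L)))) := by
  unfold sort_constraints
  rw [pvA_fun_eq]
  set cd := c.foldl (fun cd kv => cd.insert ((kv.2.length : Int))
      ((cd.getD ((kv.2.length : Int)) PySem.Dict.empty).insert kv.1 kv.2)) PySem.Dict.empty with hcd
  have hkeys : cd.keys = PySem.Set.ofList (c.map (fun kv => (kv.2.length : Int))) := by
    rw [hcd, PySem.Dict.keys_foldl_insert_key c (fun kv => (kv.2.length : Int))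
      (fun d kv => (d.getD ((kv.2.length : Int)) PySem.Dict.empty).insert kv.1 kv.2) PySem.Dict.empty]
    rw [PySem.Dict.keys_empty, PySem.Set.ofList_eq_foldl]
    rfl
  have hnd : cd.keys.Nodup := by
    rw [hcd]
    exact PySem.Dict.nodup_keys_foldl_insert_key c (fun kv => (kv.2.length : Int)) _ _
      (by rw [PySem.Dict.keys_empty]; exact List.nodup_nil)
  have hbucket : ∀ L : Int, (cd.getD L PySem.Dict.empty).items
      = c.filter (fun kv => ((kv.2.length : Int) == L)) := by
    intro L
    have := pvBucketA c PySem.Dict.empty hpre (by intro kv _ M; simp) L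
    simpa using this
  have hsorted : PySem.List.sorted cd.items (fun p => p.1)
      = (PySem.List.sorted cd.keys (fun x => x)).map (fun L => (L, cd.getD L PySem.Dict.empty)) := by
    apply PySem.List.sorted_eq_of_perm_of_pairwise_lt
    · rw [PySem.Dict.items_eq_map_keys cd hnd PySem.Dict.empty]
      exact (PySem.List.sorted_perm cd.keys (fun x => x) false).map _
    · rw [List.pairwise_map]
      have hle := PySem.List.sorted_pairwise cd.keys (fun x => x)
      have hnd' : (PySem.List.sorted cd.keys (fun x => x)).Nodup :=
        ((PySem.List.sorted_perm cd.keys (fun x => x) false).nodup_iff).mpr hnd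
      exact (hle.and hnd').imp (fun h => lt_of_le_of_ne h.1 h.2)
  simp only [hsorted, List.map_map, hkeys]
  apply List.map_congr_left
  intro L _
  simp [Function.comp, hbucket L]

-- stability of Python's sort: the elements of one length class keep their original order
theorem pvFilter_insertBy (L : Int) (x : String × List (String × String))
    (ys : List (String × List (String × String)))
    (hys : List.Pairwise (fun a b => (a.2.length : Int) ≤ (b.2.length : Int)) ys) :
    (PySem.List.insertBy (fun a b => decide ((a.2.length : Int) < (b.2.length : Int))) x ys).filter
        (fun kv => ((kv.2.length : Int) == L))
      = ys.filter (fun kv => ((kv.2.length : Int) == L))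
        ++ (if ((x.2.length : Int) == L) then [x] else []) := by
  induction ys with
  | nil => simp [PySem.List.insertBy, List.filter_cons]
  | cons y ys ih =>
    rw [show PySem.List.insertBy (fun a b => decide ((a.2.length : Int) < (b.2.length : Int))) x (y :: ys)
        = if ((x.2.length : Int) < (y.2.length : Int)) then x :: y :: ys
          else y :: PySem.List.insertBy (fun a b => decide ((a.2.length : Int) < (b.2.length : Int))) x ys from by
      simp [PySem.List.insertBy]]
    rcases List.pairwise_cons.mp hys with ⟨hy, hys'⟩
    by_cases hb : (x.2.length : Int) < (y.2.length : Int)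
    · rw [if_pos hb]
      -- x goes in front: everything in y :: ys has length > length x
      by_cases hxL : ((x.2.length : Int) == L) = true
      · have hnone : (y :: ys).filter (fun kv => ((kv.2.length : Int) == L)) = [] := by
          apply List.filter_eq_nil_iff.mpr
          intro z hz
          have hzge : (x.2.length : Int) < (z.2.length : Int) := by
            rcases List.mem_cons.mp hz with rfl | hz'
            · exact hb
            · exact lt_of_lt_of_le hb (hy z hz')
          have hxL' : (x.2.length : Int) = L := by simpa [beq_iff_eq] using hxL
          simp [beq_iff_eq]
          omega
        rw [List.filter_cons_of_pos (by simpa using hxL), hnone, if_pos hxL]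
        simp
      · rw [List.filter_cons_of_neg (by simpa using hxL), if_neg hxL]
        simp
    · rw [if_neg hb, List.filter_cons, List.filter_cons, ih hys']
      by_cases hyL : ((y.2.length : Int) == L) = true
      · rw [if_pos hyL, if_pos hyL]
        simp
      · rw [if_neg hyL, if_neg hyL]
  
-- filtering one length class commutes with the stable sort
theorem pvFilter_sorted (L : Int) (c : List (String × List (String × String))) :
    (PySem.List.sorted c (fun kv => (kv.2.length : Int))).filter (fun kv => ((kv.2.length : Int) == L))
      = c.filter (fun kv => ((kv.2.length : Int) == L)) := by
  induction c using List.reverseRecOn with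
  | nil => rw [PySem.List.sorted_eq_foldl_insertBy]; simp
  | append_singleton c x ih =>
    rw [PySem.List.sorted_eq_foldl_insertBy, List.foldl_append, List.foldl_cons, List.foldl_nil,
      ← PySem.List.sorted_eq_foldl_insertBy]
    rw [pvFilter_insertBy L x _ (PySem.List.sorted_pairwise c (fun kv => (kv.2.length : Int))), ih,
      List.filter_append]
    simp [List.filter_cons]

theorem pvSetFoldlContains (xs : List Int) :
    ∀ s : PySem.Set Int, (∀ x ∈ xs, x ∈ s) →
      xs.foldl PySem.Set.add s = s := by
  induction xs with
  | nil => intro s _; rfl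
  | cons x xs ih =>
    intro s h
    rw [List.foldl_cons, show PySem.Set.add s x = s from by simp [PySem.Set.add, h x (by simp)]]
    exact ih s (fun z hz => h z (List.mem_cons_of_mem _ hz))

theorem pvSetFoldlCons (a : Int) (xs : List Int) :
    ∀ s : List Int, a ∉ xs →
      xs.foldl PySem.Set.add (a :: s) = a :: xs.foldl PySem.Set.add s := by
  induction xs with
  | nil => intro s _; rfl
  | cons x xs ih =>
    intro s h
    have hxa : x ≠ a := by intro hEq; exact h (by simp [hEq])
    have hadd : PySem.Set.add (a :: s) x = a :: PySem.Set.add s x := by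
      simp only [PySem.Set.add, PySem.Set.contains]
      simp [hxa]
      split_ifs <;> simp
    rw [List.foldl_cons, hadd, ih _ (fun hm => h (List.mem_cons_of_mem _ hm)), List.foldl_cons]

theorem pvOfListDecompose (L : Int) (tm rm : List Int)
    (ht : ∀ z ∈ tm, z = L) (hr : L ∉ rm) :
    PySem.Set.ofList (L :: (tm ++ rm)) = L :: PySem.Set.ofList rm := by
  rw [PySem.Set.ofList_eq_foldl, PySem.Set.ofList_eq_foldl, List.foldl_cons]
  have h0 : PySem.Set.add ([] : List Int) L = [L] := by simp [PySem.Set.add, PySem.Set.contains]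
  rw [h0, List.foldl_append]
  rw [pvSetFoldlContains tm [L] (by intro z hz; rw [ht z hz]; simp)]
  exact pvSetFoldlCons L rm [] hr

theorem pvSetFoldlSublist (xs : List Int) :
    ∀ s : PySem.Set Int, ∃ t, xs.foldl PySem.Set.add s = s ++ t ∧ t.Sublist xs := by
  induction xs with
  | nil => exact fun s => ⟨[], by simp, by simp⟩
  | cons x xs ih =>
    intro s
    by_cases h : x ∈ s
    · obtain ⟨t, h1, h2⟩ := ih s
      exact ⟨t, by rw [List.foldl_cons, show PySem.Set.add s x = s from by simp [PySem.Set.add, h]]; exact h1,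
        h2.trans (List.sublist_cons_self x xs)⟩
    · obtain ⟨t, h1, h2⟩ := ih (s ++ [x])
      refine ⟨x :: t, ?_, h2.cons₂ x⟩
      rw [List.foldl_cons, show PySem.Set.add s x = s ++ [x] from by simp [PySem.Set.add, h], h1,
        List.append_assoc]
      rfl

theorem pvOfListSublist (xs : List Int) : (PySem.Set.ofList xs).Sublist xs := by
  obtain ⟨t, h1, h2⟩ := pvSetFoldlSublist xs []
  rw [PySem.Set.ofList_eq_foldl, h1]
  simpa using h2

theorem pvDropWhileHeadFalse {α : Type} (p : α → Bool) :
    ∀ (l : List α) (y : α) (r' : List α), l.dropWhile p = y :: r' → p y = false := by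
  intro l
  induction l with
  | nil => intro y r' h; simp at h
  | cons a l ih =>
    intro y r' h
    by_cases hpa : p a = true
    · rw [List.dropWhile_cons_of_pos hpa] at h; exact ih y r' h
    · rw [List.dropWhile_cons_of_neg (by simpa using hpa)] at h
      cases h; simpa using hpa

-- B's run-slicing on a sorted list yields the distinct lengths, each with its filter.
theorem pvRunsEq (n : Nat) :
    ∀ l : List (String × List (String × String)), l.length ≤ n →
      List.Pairwise (fun a b => (a.2.length : Int) ≤ (b.2.length : Int)) l →
      pvRuns l = (PySem.Set.ofList (l.map (fun kv => (kv.2.length : Int)))).map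
        (fun L => (L, l.filter (fun kv => ((kv.2.length : Int) == L)))) := by
  induction n with
  | zero =>
    intro l hl _
    have : l = [] := List.eq_nil_of_length_eq_zero (Nat.le_zero.mp hl)
    subst this; simp [pvRuns]
  | succ n ih =>
    intro l hl hp
    match l with
    | [] => simp [pvRuns]
    | kv :: rest =>
      have hunf : pvRuns (kv :: rest)
          = (((kv.2.length : Int)), kv :: rest.takeWhile (fun x => (x.2.length : Int) == (kv.2.length : Int))) ::
            pvRuns (rest.dropWhile (fun x => (x.2.length : Int) == (kv.2.length : Int))) := by
        simp [pvRuns]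
      rw [hunf]
      rcases List.pairwise_cons.mp hp with ⟨hhead, hrest⟩
      have hsplit : rest.takeWhile (fun x => ((x.2.length : Int) == (kv.2.length : Int)))
          ++ rest.dropWhile (fun x => ((x.2.length : Int) == (kv.2.length : Int))) = rest :=
        List.takeWhile_append_dropWhile
      set t := rest.takeWhile (fun x => ((x.2.length : Int) == (kv.2.length : Int))) with htdef
      set r := rest.dropWhile (fun x => ((x.2.length : Int) == (kv.2.length : Int))) with hrdef
      have ht : ∀ x ∈ t, (x.2.length : Int) = (kv.2.length : Int) := by
        intro x hx
        have := List.mem_takeWhile_imp (htdef ▸ hx)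
        simpa [beq_iff_eq] using this
      have hrsub : r.Sublist rest := hrdef ▸ List.dropWhile_sublist _
      have hrpair : List.Pairwise (fun a b => (a.2.length : Int) ≤ (b.2.length : Int)) r :=
        hrest.sublist hrsub
      have hr : ∀ x ∈ r, (kv.2.length : Int) < (x.2.length : Int) := by
        cases hre : r with
        | nil => intro x hx; simp at hx
        | cons y r' =>
          have hy0 : ((y.2.length : Int) == (kv.2.length : Int)) = false :=
            pvDropWhileHeadFalse _ rest y r' (by rw [← hrdef]; exact hre)
          have hy1 : (kv.2.length : Int) ≤ (y.2.length : Int) :=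
            hhead y (hrsub.mem (by simp [hre]))
          have hyne : (y.2.length : Int) ≠ (kv.2.length : Int) := by
            simpa [beq_iff_eq] using hy0
          have hy : (kv.2.length : Int) < (y.2.length : Int) :=
            lt_of_le_of_ne hy1 (fun h => hyne h.symm)
          intro x hx
          rcases List.mem_cons.mp hx with rfl | hx'
          · exact hy
          · have hpair' := hrpair
            rw [hre] at hpair'
            have := (List.pairwise_cons.mp hpair').1 x hx'
            omega
      have hlen : rest.length ≤ n := Nat.le_of_succ_le_succ (by simpa using hl)
      have hrec := ih r (le_trans hrsub.length_le hlen) hrpair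
      rw [hrec]
      have hmap : (kv :: rest).map (fun kv => (kv.2.length : Int))
          = (kv.2.length : Int) :: (t.map (fun kv => (kv.2.length : Int)) ++ r.map (fun kv => (kv.2.length : Int))) := by
        rw [List.map_cons, ← List.map_append, hsplit]
      rw [hmap, pvOfListDecompose _ _ _
        (by intro z hz; rcases List.mem_map.mp hz with ⟨x, hx, rfl⟩; exact ht x hx)
        (by intro hz; rcases List.mem_map.mp hz with ⟨x, hx, hEq⟩; have := hr x hx; omega)]
      rw [List.map_cons]
      congr 1
      · -- head entry: (K, kv :: t) = (K, (kv::rest).filter (== K))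
        congr 1
        rw [List.filter_cons_of_pos (by simp), ← hsplit, List.filter_append]
        rw [show t.filter (fun x => ((x.2.length : Int) == (kv.2.length : Int))) = t from
          List.filter_eq_self.mpr (by intro x hx; have := ht x hx; simp [beq_iff_eq]; omega)]
        rw [show r.filter (fun x => ((x.2.length : Int) == (kv.2.length : Int))) = [] from
          List.filter_eq_nil_iff.mpr (by intro x hx; have := hr x hx; simp [beq_iff_eq]; omega)]
        simp
      · -- tail entries: filters over l and over r agree for every M in the tail key set
        apply List.map_congr_left
        intro M hM
        have hMr : M ∈ r.map (fun kv => (kv.2.length : Int)) := (PySem.Set.mem_ofList _ _).mp hM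
        have hMgt : (kv.2.length : Int) < M := by
          rcases List.mem_map.mp hMr with ⟨x, hx, rfl⟩; exact hr x hx
        congr 1
        rw [List.filter_cons_of_neg (by simp [beq_iff_eq]; omega), ← hsplit, List.filter_append]
        rw [show t.filter (fun x => ((x.2.length : Int) == M)) = [] from
          List.filter_eq_nil_iff.mpr (by intro x hx; have := ht x hx; simp [beq_iff_eq]; omega)]
        simp

-- the distinct lengths of the sorted list are the sorted distinct lengths
theorem pvKsEq (c : List (String × List (String × String))) :
    PySem.Set.ofList ((PySem.List.sorted c (fun kv => (kv.2.length : Int))).map (fun kv => (kv.2.length : Int)))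
      = PySem.List.sorted (PySem.Set.ofList (c.map (fun kv => (kv.2.length : Int)))) (fun x => x) := by
  apply (PySem.List.sorted_eq_of_perm_of_pairwise_lt _ _ _ ?_ ?_).symm
  · rw [List.perm_ext_iff_of_nodup (PySem.Set.nodup_ofList _) (PySem.Set.nodup_ofList _)]
    intro a
    rw [PySem.Set.mem_ofList, PySem.Set.mem_ofList]
    exact ((PySem.List.sorted_perm c (fun kv => (kv.2.length : Int)) false).map
      (fun kv => (kv.2.length : Int))).mem_iff
  · have hle : List.Pairwise (fun a b : Int => a ≤ b)
        ((PySem.List.sorted c (fun kv => (kv.2.length : Int))).map (fun kv => (kv.2.length : Int))) :=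
      List.pairwise_map.mpr (PySem.List.sorted_pairwise c (fun kv => (kv.2.length : Int)))
    have h1 := hle.sublist (pvOfListSublist _)
    have h2 := PySem.Set.nodup_ofList
      ((PySem.List.sorted c (fun kv => (kv.2.length : Int))).map (fun kv => (kv.2.length : Int)))
    exact (h1.and h2).imp (fun h => lt_of_le_of_ne h.1 h.2)

theorem pvB_eq_canon (c : List (String × List (String × String))) :
    sort_constraints_alt c
      = (PySem.List.sorted (PySem.Set.ofList (c.map (fun kv => (kv.2.length : Int)))) (fun x => x)).map
          (fun L => (L, c.filter (fun kv => ((kv.2.length : Int) == L)))) := by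
  unfold sort_constraints_alt
  rw [pvRunsEq (PySem.List.sorted c (fun kv => (kv.2.length : Int))).length _ le_rfl
    (PySem.List.sorted_pairwise c (fun kv => (kv.2.length : Int)))]
  rw [pvKsEq]
  apply List.map_congr_left
  intro L _
  rw [pvFilter_sorted L c]

-- ===== VERDICT (by name: the statement is the Claim_ definition above) =====
theorem sort_constraints_spec : Claim_equal_sort_constraints := by
  intro c _ hpre
  unfold Spec_sort_constraints
  rw [pvA_eq_canon c hpre, pvB_eq_canon c]
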